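-- pv_equiv track=rewrite | github.com/qam4/blunder | scripts/bench/compare.py | _latest_by_evaluator
-- ===== SOURCE A (Python) =====
-- def _latest_by_evaluator(rows: list[dict]) -> dict[str, list[dict]]:
--     """Group rows by evaluator, keeping only the latest timestamp per key.
--
--     Returns ``{evaluator: [rows with that evaluator at latest timestamp]}``.
--     """
--     # Find the latest timestamp per evaluator
--     latest_ts: dict[str, str] = {}
--     for r in rows:
--         ev = r.get("evaluator", "")
--         ts = r.get("timestamp", "")
--         if ev not in latest_ts or ts > latest_ts[ev]:
--             latest_ts[ev] = ts
--
--     grouped: dict[str, list[dict]] = {}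
--     for r in rows:
--         ev = r.get("evaluator", "")
--         ts = r.get("timestamp", "")
--         if ts == latest_ts.get(ev):
--             grouped.setdefault(ev, []).append(r)
--     return grouped
-- ===== SOURCE B (Python) =====
-- def _latest_by_evaluator(rows: list[dict]) -> dict[str, list[dict]]:
--     """Group rows by evaluator, keeping only the latest timestamp per key.
--
--     One streaming pass: per evaluator keep (best timestamp, its rows); a strictly
--     newer timestamp discards the obsolete group (pop + reinsert, so each key's
--     position reflects when its final timestamp first appeared).
--     """
--     best: dict[str, tuple[str, list[dict]]] = {}
--     for r in rows:
--         ev = r.get("evaluator", "")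
--         ts = r.get("timestamp", "")
--         cur = best.get(ev)
--         if cur is None or ts > cur[0]:
--             best.pop(ev, None)
--             best[ev] = (ts, [r])
--         elif ts == cur[0]:
--             cur[1].append(r)
--     return {ev: group for ev, (_, group) in best.items()}
-- ===== Notes on version B (the rewrite author's own statement) =====
-- stated objective: alternative
-- what changed: Replaces A's two passes (first compute a latest-timestamp dict over all rows, then re-scan all rows to group) by a single streaming pass over one dict mapping each evaluator to (best timestamp, its rows), discarding a group the moment a strictly newer timestamp appears and reshaping at the end.
import Mathlib
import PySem

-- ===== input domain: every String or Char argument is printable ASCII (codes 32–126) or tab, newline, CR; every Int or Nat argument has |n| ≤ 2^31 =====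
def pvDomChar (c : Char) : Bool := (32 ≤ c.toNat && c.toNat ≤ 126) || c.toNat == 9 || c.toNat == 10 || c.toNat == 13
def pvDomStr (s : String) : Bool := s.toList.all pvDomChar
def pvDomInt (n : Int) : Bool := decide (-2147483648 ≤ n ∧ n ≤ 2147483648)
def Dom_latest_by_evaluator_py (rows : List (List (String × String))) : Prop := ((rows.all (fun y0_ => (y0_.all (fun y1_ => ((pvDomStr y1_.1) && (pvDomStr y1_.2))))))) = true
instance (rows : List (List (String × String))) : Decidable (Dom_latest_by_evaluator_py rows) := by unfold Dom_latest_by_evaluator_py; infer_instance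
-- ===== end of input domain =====

-- B replaces A's two passes by one streaming pass over a single dict; return values proved equal (B performs no observable mutation of the argument).

-- shared helper: r.get(k, "") on a row (a Python dict, here an association list)
def pvRowGet (r : List (String × String)) (k : String) : String :=
  (PySem.Dict.mk r).getD k ""

-- ===== PORT A =====
-- first pass: latest_ts[ev] = ts  if ev not in latest_ts or ts > latest_ts[ev]
def pvStepL (d : PySem.Dict String String) (r : List (String × String)) : PySem.Dict String String :=
  let ev := pvRowGet r "evaluator"
  let ts := pvRowGet r "timestamp"
  match d.get? ev with
  | none => d.insert ev ts
  | some t => if t < ts then d.insert ev ts else d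

-- second pass: if ts == latest_ts.get(ev): grouped.setdefault(ev, []).append(r)
def pvStepG (lt : PySem.Dict String String)
    (g : PySem.Dict String (List (List (String × String)))) (r : List (String × String)) :
    PySem.Dict String (List (List (String × String))) :=
  let ev := pvRowGet r "evaluator"
  let ts := pvRowGet r "timestamp"
  if lt.get? ev = some ts then
    match g.get? ev with
    | none => g.insert ev [r]
    | some l => g.insert ev (l ++ [r])
  else g

def latest_by_evaluator_py (rows : List (List (String × String))) : List (String × List (List (String × String))) :=
  let latest_ts := rows.foldl pvStepL PySem.Dict.empty
  (rows.foldl (pvStepG latest_ts) PySem.Dict.empty).items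

-- ===== PORT B =====
-- one streaming step over best : ev -> (best ts, rows at that ts); strictly newer ts pops the stale group and reinserts
def pvStepB (m : PySem.Dict String (String × List (List (String × String)))) (r : List (String × String)) :
    PySem.Dict String (String × List (List (String × String))) :=
  let ev := pvRowGet r "evaluator"
  let ts := pvRowGet r "timestamp"
  match m.get? ev with
  | none => (m.erase ev).insert ev (ts, [r])
  | some (t, g) =>
    if t < ts then (m.erase ev).insert ev (ts, [r])
    else if ts = t then m.insert ev (t, g ++ [r])
    else m

def latest_by_evaluator_py_alt (rows : List (List (String × String))) : List (String × List (List (String × String))) :=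
  ((rows.foldl pvStepB PySem.Dict.empty).items).map (fun p => (p.1, p.2.2))

-- ===== PRECONDITION & SPEC =====
def Spec_latest_by_evaluator_py (rows : List (List (String × String))) (out : List (String × List (List (String × String)))) : Prop := out = latest_by_evaluator_py_alt rows
instance (rows : List (List (String × String))) (out : List (String × List (List (String × String)))) : Decidable (Spec_latest_by_evaluator_py rows out) := by unfold Spec_latest_by_evaluator_py; infer_instance

-- ===== CLAIM (what is proved, stated in full; the proofs are below) =====
def Claim_equal_latest_by_evaluator_py : Prop := ∀ (rows : List (List (String × String))), Dom_latest_by_evaluator_py rows → Spec_latest_by_evaluator_py rows (latest_by_evaluator_py rows)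

-- ===== LEMMAS AND PROOFS =====

-- proof-only abbreviations
def pvEv (r : List (String × String)) : String := pvRowGet r "evaluator"
def pvTs (r : List (String × String)) : String := pvRowGet r "timestamp"
def pvF (p : String × (String × List (List (String × String)))) : String × List (List (String × String)) :=
  (p.1, p.2.2)

theorem pv_find?_filter_ne {ν : Type} (l : List (String × ν)) {k k' : String} (h : k' ≠ k) :
    List.find? (fun p => p.1 == k') (List.filter (fun p => !(p.1 == k)) l)
      = List.find? (fun p => p.1 == k') l := by
  induction l with
  | nil => rfl
  | cons p l ih =>
    rw [List.filter_cons]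
    by_cases hk : p.1 = k
    · have hk' : ¬ (p.1 = k') := by rw [hk]; exact (Ne.symm h)
      rw [if_neg (by simp [hk])]
      simp [hk', ih]
    · by_cases hk' : p.1 = k'
      · rw [if_pos (by simp [hk])]
        simp [hk']
      · rw [if_pos (by simp [hk])]
        simp [hk', ih]

theorem pv_get?_erase_self {ν : Type} (d : PySem.Dict String ν) (k : String) :
    (d.erase k).get? k = none := by
  simp only [PySem.Dict.get?, PySem.Dict.erase, Option.map_eq_none_iff]
  rw [List.find?_eq_none]
  intro x hx
  simp only [List.mem_filter] at hx
  simpa using hx.2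

theorem pv_get?_erase_of_ne {ν : Type} (d : PySem.Dict String ν) {k k' : String} (h : k' ≠ k) :
    (d.erase k).get? k' = d.get? k' := by
  simp only [PySem.Dict.get?, PySem.Dict.erase]
  rw [pv_find?_filter_ne _ h]

theorem pv_erase_of_get?_none {ν : Type} (d : PySem.Dict String ν) {k : String}
    (h : d.get? k = none) : d.erase k = d := by
  simp only [PySem.Dict.get?, Option.map_eq_none_iff, List.find?_eq_none] at h
  apply PySem.Dict.ext
  simp only [PySem.Dict.erase]
  rw [List.filter_eq_self]
  intro a ha
  simpa using h a ha

theorem pv_filter_ne_map_insert {ν : Type} (l : List (String × ν)) (k k' : String) (v : ν)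
    (h : k' = k ∨ k' ≠ k) :
    List.filter (fun p => !(p.1 == k)) (List.map (fun p => if (p.1 == k') = true then (k', v) else p) l)
      = if k' = k then List.filter (fun p => !(p.1 == k)) l
        else List.map (fun p => if (p.1 == k') = true then (k', v) else p)
              (List.filter (fun p => !(p.1 == k)) l) := by
  rw [List.filter_map]
  by_cases hkk : k' = k
  · subst hkk
    rw [if_pos rfl]
    have he : ∀ p : String × ν, ((fun q : String × ν => !(q.1 == k')) ∘
        (fun p : String × ν => if (p.1 == k') = true then (k', v) else p)) p
        = (fun q : String × ν => !(q.1 == k')) p := by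
      intro p; by_cases hp : p.1 = k' <;> simp [hp]
    rw [List.filter_congr (fun p _ => he p)]
    refine Eq.trans (List.map_congr_left ?_) (List.map_id _)
    intro p hp
    simp only [List.mem_filter] at hp
    have : ¬ (p.1 = k') := by simpa using hp.2
    simp [this]
  · rw [if_neg hkk]
    have he : ∀ p : String × ν, ((fun q : String × ν => !(q.1 == k)) ∘
        (fun p : String × ν => if (p.1 == k') = true then (k', v) else p)) p
        = (fun q : String × ν => !(q.1 == k)) p := by
      intro p; by_cases hp : p.1 = k' <;> simp [hp]
    rw [List.filter_congr (fun p _ => he p)]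

theorem pv_erase_insert_self {ν : Type} (d : PySem.Dict String ν) (k : String) (v : ν) :
    (d.insert k v).erase k = d.erase k := by
  apply PySem.Dict.ext
  by_cases hc : d.contains k
  · simp only [PySem.Dict.insert, hc, if_pos, PySem.Dict.erase]
    have := pv_filter_ne_map_insert d.items k k v (Or.inl rfl)
    rw [if_pos rfl] at this
    exact this
  · simp only [PySem.Dict.insert, hc, Bool.false_eq_true, PySem.Dict.erase]
    simp

theorem pv_contains_erase_of_ne {ν : Type} (d : PySem.Dict String ν) {k k' : String} (h : k' ≠ k) :
    (d.erase k).contains k' = d.contains k' := by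
  simp only [PySem.Dict.contains, PySem.Dict.erase]
  induction d.items with
  | nil => rfl
  | cons p l ih =>
    rw [List.filter_cons]
    by_cases hk : p.1 = k
    · have hk' : ¬ (p.1 = k') := by rw [hk]; exact (Ne.symm h)
      rw [if_neg (by simp [hk]), ih]
      rw [List.any_cons, show (p.1 == k') = false from by simp [hk']]
      simp
    · rw [if_pos (by simp [hk]), List.any_cons, List.any_cons, ih]

theorem pv_erase_insert_comm {ν : Type} (d : PySem.Dict String ν) {k k' : String} (v : ν)
    (h : k' ≠ k) : (d.insert k' v).erase k = (d.erase k).insert k' v := by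
  apply PySem.Dict.ext
  have hc := pv_contains_erase_of_ne (ν := ν) d h
  by_cases hck : d.contains k'
  · simp only [PySem.Dict.insert, hck, if_pos, PySem.Dict.erase]
    have := pv_filter_ne_map_insert d.items k k' v (Or.inr h)
    rw [if_neg h] at this
    simp only [PySem.Dict.erase] at hc
    rw [hc, hck] at *
    exact this
  · simp only [PySem.Dict.insert, hck, Bool.false_eq_true, PySem.Dict.erase]
    simp only [PySem.Dict.erase] at hc
    rw [hc]
    simp only [hck, Bool.false_eq_true]
    simp [h]


theorem pvStepL_eq (d : PySem.Dict String String) (r : List (String × String)) :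
    pvStepL d r = match d.get? (pvEv r) with
      | none => d.insert (pvEv r) (pvTs r)
      | some t => if t < pvTs r then d.insert (pvEv r) (pvTs r) else d := rfl

theorem pvStepG_eq (lt : PySem.Dict String String)
    (g : PySem.Dict String (List (List (String × String)))) (r : List (String × String)) :
    pvStepG lt g r = if lt.get? (pvEv r) = some (pvTs r) then
      (match g.get? (pvEv r) with
       | none => g.insert (pvEv r) [r]
       | some l => g.insert (pvEv r) (l ++ [r]))
      else g := rfl

theorem pvStepB_eq (m : PySem.Dict String (String × List (List (String × String))))
    (r : List (String × String)) :
    pvStepB m r = match m.get? (pvEv r) with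
      | none => (m.erase (pvEv r)).insert (pvEv r) (pvTs r, [r])
      | some (t, g) =>
        if t < pvTs r then (m.erase (pvEv r)).insert (pvEv r) (pvTs r, [r])
        else if pvTs r = t then m.insert (pvEv r) (t, g ++ [r])
        else m := rfl

-- a fresh key in latest_ts does not change the grouping pass
theorem pv_G_fresh (lt : PySem.Dict String String) (e s : String)
    (rows : List (List (String × String))) (h : ∀ r ∈ rows, pvEv r ≠ e)
    (g : PySem.Dict String (List (List (String × String)))) :
    rows.foldl (pvStepG (lt.insert e s)) g = rows.foldl (pvStepG lt) g := by
  apply PySem.List.foldl_congr_mem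
  intro acc r hr
  rw [pvStepG_eq, pvStepG_eq, PySem.Dict.get?_insert_of_ne lt s (h r hr)]

-- raising e's latest timestamp to a value no row of the prefix carries erases e's group
theorem pv_G_erase (lt : PySem.Dict String String) (e s : String)
    (rows : List (List (String × String))) (h : ∀ r ∈ rows, pvEv r = e → pvTs r ≠ s) :
    ∀ g, rows.foldl (pvStepG (lt.insert e s)) (g.erase e) = (rows.foldl (pvStepG lt) g).erase e := by
  induction rows with
  | nil => intro g; rfl
  | cons r rows ih =>
    intro g
    rw [List.foldl_cons, List.foldl_cons]
    have hstep : pvStepG (lt.insert e s) (g.erase e) r = (pvStepG lt g r).erase e := by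
      by_cases he : pvEv r = e
      · rw [pvStepG_eq, pvStepG_eq, he, PySem.Dict.get?_insert_self]
        rw [if_neg (by intro hc; exact h r (List.mem_cons_self) he ((Option.some_injective _ hc).symm))]
        by_cases hc : lt.get? e = some (pvTs r)
        · rw [if_pos hc]
          cases hg : g.get? e <;> simp only [] <;> rw [pv_erase_insert_self]
        · rw [if_neg hc]
      · rw [pvStepG_eq, pvStepG_eq, PySem.Dict.get?_insert_of_ne lt s he]
        by_cases hc : lt.get? (pvEv r) = some (pvTs r)
        · rw [if_pos hc, if_pos hc, pv_get?_erase_of_ne g he]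
          cases hg : g.get? (pvEv r) <;> simp only [] <;> rw [pv_erase_insert_comm _ _ he]
        · rw [if_neg hc, if_neg hc]
    rw [hstep]
    exact ih (fun r' hr' => h r' (List.mem_cons_of_mem _ hr')) _

-- get? through a value-mapped items list
theorem pv_get?_of_items_map (m : PySem.Dict String (String × List (List (String × String))))
    (gg : PySem.Dict String (List (List (String × String))))
    (h : gg.items = m.items.map (fun p => (p.1, p.2.2))) (e : String) :
    gg.get? e = (m.get? e).map (fun v => v.2) := by
  simp only [PySem.Dict.get?, h, List.find?_map]
  have : ((fun p : String × List (List (String × String)) => p.1 == e) ∘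
      (fun p : String × (String × List (List (String × String))) => (p.1, p.2.2)))
      = fun p => p.1 == e := rfl
  rw [this]
  cases List.find? (fun p => p.1 == e) m.items <;> rfl

theorem pv_main (rows : List (List (String × String))) :
    (((rows.foldl pvStepB PySem.Dict.empty).items).map pvF
        = (rows.foldl (pvStepG (rows.foldl pvStepL PySem.Dict.empty)) PySem.Dict.empty).items)
    ∧ (∀ e, ((rows.foldl pvStepB PySem.Dict.empty).get? e).map Prod.fst
        = (rows.foldl pvStepL PySem.Dict.empty).get? e)
    ∧ (∀ r ∈ rows, ∃ t, (rows.foldl pvStepL PySem.Dict.empty).get? (pvEv r) = some t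
        ∧ ¬ t < pvTs r) := by
  induction rows using List.reverseRecOn with
  | nil =>
    refine ⟨rfl, ?_, ?_⟩
    · intro e; rfl
    · intro r hr; cases hr
  | append_singleton rows r ih =>
    obtain ⟨ihm, ih1, ih3⟩ := ih
    simp only [List.foldl_append, List.foldl_cons, List.foldl_nil]
    rw [pvStepB_eq, pvStepL_eq]
    set m := rows.foldl pvStepB PySem.Dict.empty with hm_def
    set lt := rows.foldl pvStepL PySem.Dict.empty with hlt_def
    set e := pvEv r with he_def
    set s := pvTs r with hs_def
    have hggget := pv_get?_of_items_map m (rows.foldl (pvStepG lt) PySem.Dict.empty) ihm.symm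
    cases hm : m.get? e with
    | none =>
      have hl : lt.get? e = none := by rw [← ih1 e, hm]; rfl
      simp only [hl]
      have hfresh : ∀ r' ∈ rows, pvEv r' ≠ e := by
        intro r' hr' hee
        obtain ⟨t0, ht0, _⟩ := ih3 r' hr'
        rw [hee, hl] at ht0; cases ht0
      rw [pv_G_fresh lt e s rows hfresh, pvStepG_eq, ← he_def, ← hs_def,
        PySem.Dict.get?_insert_self, if_pos rfl]
      have hgg : (rows.foldl (pvStepG lt) PySem.Dict.empty).get? e = none := by
        rw [hggget e, hm]; rfl
      rw [hgg]
      have hmer : m.erase e = m := pv_erase_of_get?_none m hm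
      rw [hmer]
      have hcm : m.contains e = false := by rw [PySem.Dict.contains_eq_isSome_get?, hm]; rfl
      have hcg : (rows.foldl (pvStepG lt) PySem.Dict.empty).contains e = false := by
        rw [PySem.Dict.contains_eq_isSome_get?, hgg]; rfl
      refine ⟨?_, ?_, ?_⟩
      · rw [PySem.Dict.items_insert_of_not_contains _ _ hcm,
          PySem.Dict.items_insert_of_not_contains _ _ hcg, List.map_append, ihm]
        rfl
      · intro e'
        by_cases hee' : e' = e
        · subst hee'; rw [PySem.Dict.get?_insert_self, PySem.Dict.get?_insert_self]; rfl
        · rw [PySem.Dict.get?_insert_of_ne _ _ hee', PySem.Dict.get?_insert_of_ne _ _ hee', ih1]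
      · intro r' hr'
        rcases List.mem_append.mp hr' with hr' | hr'
        · obtain ⟨t0, ht0, hn⟩ := ih3 r' hr'
          exact ⟨t0, by rw [PySem.Dict.get?_insert_of_ne _ _ (hfresh r' hr'), ht0], hn⟩
        · rw [List.mem_singleton] at hr'; subst hr'
          exact ⟨s, by rw [← he_def, PySem.Dict.get?_insert_self], lt_irrefl s⟩
    | some tv =>
      obtain ⟨t, gr⟩ := tv
      have hlt : lt.get? e = some t := by rw [← ih1 e, hm]; rfl
      simp only [hlt]
      by_cases hts : t < s
      · -- strictly newer timestamp: the old group is discarded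
        rw [if_pos hts, if_pos hts]
        have hne : ∀ r' ∈ rows, pvEv r' = e → pvTs r' ≠ s := by
          intro r' hr' hee heq
          obtain ⟨t0, ht0, hn⟩ := ih3 r' hr'
          rw [hee, hlt] at ht0
          obtain rfl : t = t0 := Option.some_injective _ ht0
          rw [heq] at hn; exact hn hts
        have herg := pv_G_erase lt e s rows hne PySem.Dict.empty
        have hee : (PySem.Dict.empty : PySem.Dict String (List (List (String × String)))).erase e
            = PySem.Dict.empty := rfl
        rw [hee] at herg
        rw [herg, pvStepG_eq, ← he_def, ← hs_def, PySem.Dict.get?_insert_self, if_pos rfl,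
          pv_get?_erase_self]
        have hcm : (m.erase e).contains e = false := by
          rw [PySem.Dict.contains_eq_isSome_get?, pv_get?_erase_self]; rfl
        have hcg : ((rows.foldl (pvStepG lt) PySem.Dict.empty).erase e).contains e = false := by
          rw [PySem.Dict.contains_eq_isSome_get?, pv_get?_erase_self]; rfl
        refine ⟨?_, ?_, ?_⟩
        · rw [PySem.Dict.items_insert_of_not_contains _ _ hcm,
            PySem.Dict.items_insert_of_not_contains _ _ hcg, List.map_append]
          congr 1
          simp only [PySem.Dict.erase, ihm.symm, List.filter_map]
          rfl
        · intro e'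
          by_cases hee' : e' = e
          · subst hee'; rw [PySem.Dict.get?_insert_self, PySem.Dict.get?_insert_self]; rfl
          · rw [PySem.Dict.get?_insert_of_ne _ _ hee', PySem.Dict.get?_insert_of_ne _ _ hee',
              pv_get?_erase_of_ne _ hee', ih1]
        · intro r' hr'
          rcases List.mem_append.mp hr' with hr' | hr'
          · obtain ⟨t0, ht0, hn⟩ := ih3 r' hr'
            by_cases hee' : pvEv r' = e
            · rw [hee', hlt] at ht0
              obtain rfl : t = t0 := Option.some_injective _ ht0
              refine ⟨s, by rw [hee', PySem.Dict.get?_insert_self], ?_⟩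
              intro hcon
              exact absurd (lt_of_lt_of_le hcon (not_lt.mp hn)) (not_lt.mpr (le_of_lt hts))
            · exact ⟨t0, by rw [PySem.Dict.get?_insert_of_ne _ _ hee', ht0], hn⟩
          · rw [List.mem_singleton] at hr'; subst hr'
            exact ⟨s, by rw [← he_def, PySem.Dict.get?_insert_self], lt_irrefl s⟩
      · simp only [if_neg hts]
        by_cases hst : s = t
        · -- equal timestamp: append to the existing group
          rw [if_pos hst, pvStepG_eq, ← he_def, ← hs_def, hlt]
          rw [if_pos (by rw [hst])]
          have hgg : (rows.foldl (pvStepG lt) PySem.Dict.empty).get? e = some gr := by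
            rw [hggget e, hm]; rfl
          rw [hgg]
          have hcm : m.contains e = true := by
            rw [PySem.Dict.contains_eq_isSome_get?, hm]; rfl
          have hcg : (rows.foldl (pvStepG lt) PySem.Dict.empty).contains e = true := by
            rw [PySem.Dict.contains_eq_isSome_get?, hgg]; rfl
          refine ⟨?_, ?_, ?_⟩
          · rw [PySem.Dict.items_insert_of_contains _ _ hcm,
              PySem.Dict.items_insert_of_contains _ _ hcg, ihm.symm, List.map_map, List.map_map]
            apply List.map_congr_left
            intro p _
            by_cases hp : p.1 = e
            · simp [Function.comp, pvF, hp]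
            · simp [Function.comp, pvF, hp]
          · intro e'
            by_cases hee' : e' = e
            · subst hee'; rw [PySem.Dict.get?_insert_self, hlt]; rfl
            · rw [PySem.Dict.get?_insert_of_ne _ _ hee', ih1]
          · intro r' hr'
            rcases List.mem_append.mp hr' with hr' | hr'
            · exact ih3 r' hr'
            · rw [List.mem_singleton] at hr'; subst hr'
              exact ⟨t, hlt, hts⟩
        · -- stale timestamp: nothing changes on either side
          rw [if_neg hst, pvStepG_eq, ← he_def, ← hs_def, hlt,
            if_neg (by intro hc; exact hst (Option.some_injective _ hc).symm)]
          refine ⟨ihm, ih1, ?_⟩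
          intro r' hr'
          rcases List.mem_append.mp hr' with hr' | hr'
          · exact ih3 r' hr'
          · rw [List.mem_singleton] at hr'; subst hr'
            exact ⟨t, hlt, hts⟩

-- ===== VERDICT (by name: the statement is the Claim_ definition above) =====
theorem latest_by_evaluator_py_spec : Claim_equal_latest_by_evaluator_py := by
  intro rows _
  unfold Spec_latest_by_evaluator_py latest_by_evaluator_py latest_by_evaluator_py_alt
  exact ((pv_main rows).1).symm
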